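-- pv_equiv track=rewrite | github.com/MinHoon-LEE/Ps_Sql | Programmers/Algorithm/Python/42862/42862.py | solution
-- ===== SOURCE A (Python) =====
-- def solution(n, lost, reserve):
--     lost.sort()
--     reserve.sort()
--     count = 0
--     lost2 = []
--     for i in range (len(lost)):
--         check = 0
--         for j in range(len(reserve)):
--             if (lost[i] == reserve[j]):
--                 check = 1
--         if (check == 0):
--             lost2.append(lost[i])
--     for i in range (len(lost)):
--         for j in range(len(reserve)):
--             if (lost[i] == reserve[j]):
--                 reserve.pop(j)
--                 break
--     for i in range (len(lost2)):
--         for j in range(len(reserve)):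
--             if (lost2[i] - 1 == reserve[j]):
--                 count += 1
--                 reserve.pop(j)
--                 break
--             if (lost2[i] + 1 == reserve[j]):
--                 count += 1
--                 reserve.pop(j)
--                 break
--     answer = n - (len(lost2) - count)
--     return answer
-- ===== SOURCE B (Python) =====
-- def solution(n, lost, reserve):
--     # Bucket/value-sweep: group both lists into value->count dicts, compute the
--     # leftover reserve per value in closed form, then one ascending pass over the
--     # distinct lost-only values matching whole buckets with min() arithmetic.
--     # (A sorts its arguments and pops from reserve in place; B does not mutate --
--     # the equivalence is about the return value.)
--     rc = {}
--     for r in reserve: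
--         rc[r] = rc.get(r, 0) + 1
--     lc = {}
--     for x in lost:
--         lc[x] = lc.get(x, 0) + 1
--     rem = {v: c - min(c, lc.get(v, 0)) for v, c in rc.items()}
--     missing = 0
--     count = 0
--     for v in sorted(lc):
--         if v in rc:
--             continue
--         l = lc[v]
--         missing += l
--         a = min(l, rem.get(v - 1, 0))
--         if a:
--             rem[v - 1] -= a
--         b = min(l - a, rem.get(v + 1, 0))
--         if b:
--             rem[v + 1] -= b
--         count += a + b
--     return n - (missing - count)
-- ===== Notes on version B (the rewrite author's own statement) =====
-- stated objective: faster
-- what changed: Replaced A's per-student sorted-list scans with in-place pops by a value-bucket sweep: value->count dicts for both lists, a closed-form leftover-reserve dict (count minus exact matches), and one ascending pass over the distinct lost-only values that matches whole buckets at once with min() arithmetic instead of iterating students.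
import Mathlib
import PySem

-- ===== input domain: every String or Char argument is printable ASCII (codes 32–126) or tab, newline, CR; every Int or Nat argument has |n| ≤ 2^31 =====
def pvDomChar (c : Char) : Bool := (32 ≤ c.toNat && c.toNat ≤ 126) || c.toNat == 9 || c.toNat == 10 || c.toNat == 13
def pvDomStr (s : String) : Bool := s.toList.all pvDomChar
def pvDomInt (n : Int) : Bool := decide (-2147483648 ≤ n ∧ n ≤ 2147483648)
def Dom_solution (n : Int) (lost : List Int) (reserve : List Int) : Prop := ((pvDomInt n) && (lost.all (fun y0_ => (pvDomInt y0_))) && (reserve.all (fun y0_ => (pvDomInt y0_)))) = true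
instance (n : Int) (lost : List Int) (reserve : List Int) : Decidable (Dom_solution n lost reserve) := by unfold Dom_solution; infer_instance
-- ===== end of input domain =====

-- B replaces A's per-student nested list scans with a value-bucket sweep: value→count
-- dicts, a closed-form leftover-reserve dict, and one ascending pass over the distinct
-- lost-only values matching whole buckets with min() arithmetic. A mutates its arguments
-- (sorts them, pops from reserve); B does not — the equivalence is about the return value.

-- ===== PORT A =====
-- inner loop of A's second pass: scan reserve, pop first element equal to x ('break')
def popEq : List Int → Int → List Int
  | [], _ => []
  | r :: rs, x => if x == r then rs else r :: popEq rs x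

-- inner loop of A's third pass: scan reserve, pop first element equal to x-1 or x+1
def popAdj (x : Int) : List Int → Option (List Int)
  | [] => none
  | r :: rs =>
      if x - 1 == r then some rs
      else if x + 1 == r then some rs
      else (popAdj x rs).map (r :: ·)

def solution (n : Int) (lost : List Int) (reserve : List Int) : Int :=
  let L := PySem.List.sorted lost (fun x => x) false
  let R := PySem.List.sorted reserve (fun x => x) false
  let lost2 := L.foldl (fun l2 x =>
      let check := R.foldl (fun c r => if x == r then (1 : Int) else c) 0
      if check == 0 then l2 ++ [x] else l2) []
  let R1 := L.foldl (fun r x => popEq r x) R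
  let s := lost2.foldl (fun (s : Int × List Int) x =>
      match popAdj x s.2 with
      | some r' => (s.1 + 1, r')
      | none => s) (0, R1)
  n - ((lost2.length : Int) - s.1)

-- ===== PORT B =====
-- loop body of B's sweep over the sorted distinct lost values
def altStep (lc rc : PySem.Dict Int Int) (s : PySem.Dict Int Int × Int × Int) (v : Int) :
    PySem.Dict Int Int × Int × Int :=
  if rc.contains v then s
  else
    let l := lc.getD v 0           -- lc[v]; v is a key of lc, so getD is exact here
    let missing := s.2.1 + l
    let a := min l (s.1.getD (v - 1) 0)
    let rem1 := if a ≠ 0 then s.1.insert (v - 1) (s.1.getD (v - 1) 0 - a) else s.1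
    let b := min (l - a) (rem1.getD (v + 1) 0)
    let rem2 := if b ≠ 0 then rem1.insert (v + 1) (rem1.getD (v + 1) 0 - b) else rem1
    (rem2, missing, s.2.2 + a + b)

def solution_alt (n : Int) (lost : List Int) (reserve : List Int) : Int :=
  let rc := reserve.foldl (fun d r => d.insert r (d.getD r 0 + 1)) (PySem.Dict.empty : PySem.Dict Int Int)
  let lc := lost.foldl (fun d x => d.insert x (d.getD x 0 + 1)) (PySem.Dict.empty : PySem.Dict Int Int)
  let rem := rc.items.foldl (fun d p => d.insert p.1 (p.2 - min p.2 (lc.getD p.1 0)))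
      (PySem.Dict.empty : PySem.Dict Int Int)
  let s := (PySem.List.sorted lc.keys (fun v => v) false).foldl (altStep lc rc) (rem, 0, 0)
  n - (s.2.1 - s.2.2)

-- ===== PRECONDITION & SPEC =====
def Spec_solution (n : Int) (lost : List Int) (reserve : List Int) (out : Int) : Prop := out = solution_alt n lost reserve
instance (n : Int) (lost : List Int) (reserve : List Int) (out : Int) : Decidable (Spec_solution n lost reserve out) := by unfold Spec_solution; infer_instance

-- ===== CLAIM (what is proved, stated in full; the proofs are below) =====
def Claim_equal_solution : Prop := ∀ (n : Int) (lost : List Int) (reserve : List Int), Dom_solution n lost reserve → Spec_solution n lost reserve (solution n lost reserve)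

-- ===== LEMMAS AND PROOFS =====

-- the per-element greedy step on a count dict (proof-side abstraction of A's third pass)
def pstep (s : PySem.Dict Int Int × Int) (x : Int) : PySem.Dict Int Int × Int :=
  if s.1.getD (x - 1) 0 > 0 then (s.1.insert (x - 1) (s.1.getD (x - 1) 0 - 1), s.2 + 1)
  else if s.1.getD (x + 1) 0 > 0 then (s.1.insert (x + 1) (s.1.getD (x + 1) 0 - 1), s.2 + 1)
  else s

-- altStep with the skip branch removed (used on the filtered key list)
def bstep (lc : PySem.Dict Int Int) (s : PySem.Dict Int Int × Int × Int) (v : Int) :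
    PySem.Dict Int Int × Int × Int :=
  let l := lc.getD v 0
  let missing := s.2.1 + l
  let a := min l (s.1.getD (v - 1) 0)
  let rem1 := if a ≠ 0 then s.1.insert (v - 1) (s.1.getD (v - 1) 0 - a) else s.1
  let b := min (l - a) (rem1.getD (v + 1) 0)
  let rem2 := if b ≠ 0 then rem1.insert (v + 1) (rem1.getD (v + 1) 0 - b) else rem1
  (rem2, missing, s.2.2 + a + b)

-- the 'check' inner loop is a membership test
theorem checkFold (x : Int) (R : List Int) (c : Int) :
    R.foldl (fun c r => if x == r then (1 : Int) else c) c = if x ∈ R then 1 else c := by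
  induction R generalizing c with
  | nil => simp
  | cons r rs ih =>
    simp only [List.foldl_cons, ih, List.mem_cons]
    by_cases h : x = r <;> by_cases h2 : x ∈ rs <;> simp [h, h2]

-- popEq is List.erase
theorem popEq_eq_erase (r : List Int) (x : Int) : popEq r x = r.erase x := by
  induction r with
  | nil => rfl
  | cons a rs ih =>
    simp only [popEq, List.erase_cons, ih, beq_iff_eq]
    by_cases h : x = a
    · simp [h]
    · simp only [if_neg h, if_neg (fun hh : a = x => h hh.symm)]

theorem count_erase' (R : List Int) (x k : Int) :
    (R.erase x).count k = R.count k - if x = k then 1 else 0 := by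
  simpa using (List.count_erase (a := k) (b := x) (l := R))

-- element counts after A's removal fold
theorem count_foldl_popEq (M : List Int) (R : List Int) (k : Int) :
    ((M.foldl (fun r x => popEq r x) R).count k) = R.count k - min (R.count k) (M.count k) := by
  induction M generalizing R with
  | nil => simp
  | cons x M' ih =>
    have h1 : (x :: M').foldl (fun r x => popEq r x) R = M'.foldl (fun r x => popEq r x) (popEq R x) := by
      simp
    rw [h1, ih, popEq_eq_erase, count_erase']
    have hcc : (x :: M').count k = M'.count k + if x = k then 1 else 0 := by
      by_cases h : x = k
      · simp [h]
      · simp [h]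
    rw [hcc]
    by_cases h : x = k <;> simp only [h] <;> omega

-- the removal fold preserves sortedness
theorem pairwise_foldl_popEq (M : List Int) (R : List Int)
    (h : R.Pairwise (· ≤ ·)) : (M.foldl (fun r x => popEq r x) R).Pairwise (· ≤ ·) := by
  induction M generalizing R with
  | nil => exact h
  | cons x M' ih =>
    simp only [List.foldl_cons]
    refine ih _ (List.Pairwise.sublist ?_ h)
    rw [popEq_eq_erase]; exact List.erase_sublist

-- on a sorted list, popAdj pops x-1 if present, else x+1 if present
theorem popAdj_sorted (x : Int) (r : List Int) (h : r.Pairwise (· ≤ ·)) :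
    popAdj x r = if x - 1 ∈ r then some (r.erase (x - 1))
                 else if x + 1 ∈ r then some (r.erase (x + 1)) else none := by
  induction r with
  | nil => simp [popAdj]
  | cons a rs ih =>
    have hle : ∀ b ∈ rs, a ≤ b := fun b hb => (List.pairwise_cons.mp h).1 b hb
    have hrs := ih (List.pairwise_cons.mp h).2
    by_cases h1 : x - 1 = a
    · subst h1
      simp [popAdj]
    · by_cases h2 : x + 1 = a
      · have hnm : x - 1 ∉ a :: rs := by
          intro hm
          rcases List.mem_cons.mp hm with hh | hh
          · exact h1 hh
          · have := hle _ hh; omega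
        rw [popAdj, if_neg (by simpa using h1), if_pos (by simpa using h2)]
        rw [if_neg hnm, if_pos (by simp [← h2]), ← h2]
        simp
      · rw [popAdj, if_neg (by simpa using h1), if_neg (by simpa using h2), hrs]
        by_cases hm1 : x - 1 ∈ rs
        · have hm1' : x - 1 ∈ a :: rs := List.mem_cons_of_mem _ hm1
          rw [if_pos hm1, if_pos hm1']
          have hb : (a == x - 1) = false := by simpa using fun hh : a = x - 1 => h1 hh.symm
          simp [hb]
        · have hm1' : x - 1 ∉ a :: rs := by
            intro hm; rcases List.mem_cons.mp hm with hh | hh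
            · exact h1 hh
            · exact hm1 hh
          rw [if_neg hm1, if_neg hm1']
          by_cases hm2 : x + 1 ∈ rs
          · have hm2' : x + 1 ∈ a :: rs := List.mem_cons_of_mem _ hm2
            rw [if_pos hm2, if_pos hm2']
            have hb : (a == x + 1) = false := by simpa using fun hh : a = x + 1 => h2 hh.symm
            simp [hb]
          · have hm2' : x + 1 ∉ a :: rs := by
              intro hm; rcases List.mem_cons.mp hm with hh | hh
              · exact h2 hh
              · exact hm2 hh
            rw [if_neg hm2, if_neg hm2']
            rfl

-- A's third pass over a sorted reserve list equals the per-element dict fold pstep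
theorem loop3_eq (xs : List Int) (r : List Int) (d : PySem.Dict Int Int) (cA cB : Int)
    (hs : r.Pairwise (· ≤ ·)) (hc : ∀ k, (r.count k : Int) = d.getD k 0) (hab : cA = cB) :
    (xs.foldl (fun (s : Int × List Int) x =>
      match popAdj x s.2 with
      | some r' => (s.1 + 1, r')
      | none => s) (cA, r)).1
    = (xs.foldl pstep (d, cB)).2 := by
  induction xs generalizing r d cA cB with
  | nil => simpa using hab
  | cons x xs ih =>
    simp only [List.foldl_cons, pstep]
    rw [popAdj_sorted x r hs]
    by_cases hm1 : x - 1 ∈ r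
    · have hg1 : d.getD (x - 1) 0 > 0 := by
        rw [← hc]; exact_mod_cast List.count_pos_iff.mpr hm1
      rw [if_pos hm1, if_pos hg1]
      refine ih _ _ _ _ ?_ ?_ (by omega)
      · exact List.Pairwise.sublist List.erase_sublist hs
      · intro k
        rw [count_erase', PySem.Dict.getD_insert, ← hc]
        have hcnt : 0 < r.count (x - 1) := List.count_pos_iff.mpr hm1
        by_cases h : k = x - 1
        · subst h; rw [if_pos rfl, if_pos rfl]
          omega
        · rw [if_neg (fun hh : x - 1 = k => h hh.symm), if_neg h]; simpa using hc k
    · have hg1 : ¬ d.getD (x - 1) 0 > 0 := by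
        rw [← hc]
        simp [List.count_eq_zero_of_not_mem hm1]
      rw [if_neg hm1, if_neg hg1]
      by_cases hm2 : x + 1 ∈ r
      · have hg2 : d.getD (x + 1) 0 > 0 := by
          rw [← hc]; exact_mod_cast List.count_pos_iff.mpr hm2
        rw [if_pos hm2, if_pos hg2]
        refine ih _ _ _ _ ?_ ?_ (by omega)
        · exact List.Pairwise.sublist List.erase_sublist hs
        · intro k
          rw [count_erase', PySem.Dict.getD_insert, ← hc]
          have hcnt : 0 < r.count (x + 1) := List.count_pos_iff.mpr hm2
          by_cases h : k = x + 1
          · subst h; rw [if_pos rfl, if_pos rfl]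
            omega
          · rw [if_neg (fun hh : x + 1 = k => h hh.symm), if_neg h]; simpa using hc k
      · have hg2 : ¬ d.getD (x + 1) 0 > 0 := by
          rw [← hc]
          simp [List.count_eq_zero_of_not_mem hm2]
        rw [if_neg hm2, if_neg hg2]
        exact ih _ _ _ _ hs hc hab

-- A's first pass builds the sorted list of lost values absent from reserve
theorem lost2_eq (lost reserve : List Int) :
    (PySem.List.sorted lost (fun x => x) false).foldl (fun l2 x =>
      let check := (PySem.List.sorted reserve (fun x => x) false).foldl (fun c r => if x == r then (1 : Int) else c) 0
      if check == 0 then l2 ++ [x] else l2) []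
    = PySem.List.sorted (lost.filter (fun x => !reserve.contains x)) (fun x => x) false := by
  have hstep : ∀ x : Int, ((if x ∈ PySem.List.sorted reserve (fun x => x) false then (1 : Int) else 0) == 0)
      = (!reserve.contains x) := by
    intro x
    by_cases h : x ∈ reserve
    · have hm : x ∈ PySem.List.sorted reserve (fun x => x) false := (PySem.List.mem_sorted _ _ _ _).mpr h
      simp [hm, h]
    · have hm : x ∉ PySem.List.sorted reserve (fun x => x) false := fun hh => h ((PySem.List.mem_sorted _ _ _ _).mp hh)
      simp [hm, h]
  simp only [checkFold, hstep]
  rw [PySem.List.foldl_append_if (p := fun x : Int => !reserve.contains x) (f := fun x => x)]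
  simp only [List.nil_append, List.map_id']
  refine (PySem.List.sorted_id_eq_of_perm_of_pairwise _ _ ?_ ?_).symm
  · exact ((PySem.List.sorted_perm lost (fun x => x) false).filter _).symm.symm
  · exact List.Pairwise.sublist List.filter_sublist (PySem.List.sorted_pairwise lost (fun x => x))

-- count of k in A's reserve after the exact-match removals, in closed form
theorem counts_eq (lost reserve : List Int) (k : Int) :
    ((((PySem.List.sorted lost (fun x => x) false).foldl (fun r x => popEq r x)
        (PySem.List.sorted reserve (fun x => x) false)).count k : Int))
    = max 0 ((reserve.count k : Int) - lost.count k) := by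
  rw [count_foldl_popEq]
  have h1 : List.count k (PySem.List.sorted reserve (fun x => x) false) = List.count k reserve :=
    (PySem.List.sorted_perm reserve (fun x => x) false).count_eq k
  have h2 : List.count k (PySem.List.sorted lost (fun x => x) false) = List.count k lost :=
    (PySem.List.sorted_perm lost (fun x => x) false).count_eq k
  rw [h1, h2]
  omega

-- a fold of inserts whose value depends only on the key, pointwise
theorem getD_foldl_insert_fn (K : List Int) (g : Int → Int) (d : PySem.Dict Int Int) (k : Int) :
    (K.foldl (fun d v => d.insert v (g v)) d).getD k 0 = if k ∈ K then g k else d.getD k 0 := by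
  induction K generalizing d with
  | nil => simp
  | cons v K' ih =>
    simp only [List.foldl_cons, ih, List.mem_cons, PySem.Dict.getD_insert]
    by_cases h1 : k ∈ K'
    · simp [h1]
    · by_cases h2 : k = v <;> simp [h1, h2]

-- B's leftover-reserve dict, in closed form
theorem rem_getD (lost reserve : List Int) (k : Int) :
    ((PySem.Dict.counter reserve).items.foldl
        (fun d p => d.insert p.1 (p.2 - min p.2 ((PySem.Dict.counter lost).getD p.1 0)))
        (PySem.Dict.empty : PySem.Dict Int Int)).getD k 0
    = max 0 ((reserve.count k : Int) - lost.count k) := by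
  rw [PySem.Dict.items_counter, List.foldl_map]
  rw [getD_foldl_insert_fn (PySem.Set.ofList reserve)
      (fun v => (reserve.count v : Int) - min (reserve.count v : Int) ((PySem.Dict.counter lost).getD v 0)) _ k]
  rw [PySem.Dict.getD_counter]
  by_cases h : k ∈ reserve
  · rw [if_pos ((PySem.Set.mem_ofList _ _).mpr h)]
    omega
  · rw [if_neg (fun hh => h ((PySem.Set.mem_ofList _ _).mp hh))]
    simp [List.count_eq_zero_of_not_mem h]

-- the skip branch of altStep is a filter
theorem altStep_filter (lc rc : PySem.Dict Int Int) (K : List Int) (s : PySem.Dict Int Int × Int × Int) :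
    K.foldl (altStep lc rc) s = (K.filter (fun v => !rc.contains v)).foldl (bstep lc) s := by
  induction K generalizing s with
  | nil => rfl
  | cons v K' ih =>
    have hf : (v :: K').filter (fun v => !rc.contains v)
        = if rc.contains v then K'.filter (fun v => !rc.contains v)
          else v :: K'.filter (fun v => !rc.contains v) := by
      by_cases h : rc.contains v <;> simp [h]
    by_cases h : rc.contains v
    · have hst : altStep lc rc s v = s := by simp [altStep, h]
      rw [List.foldl_cons, hst, ih, hf, if_pos h]
    · have hst : altStep lc rc s v = bstep lc s v := by simp [altStep, bstep, h]
      rw [List.foldl_cons, hst, ih, hf, if_neg h, List.foldl_cons]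

-- a whole bucket of equal lost values through the per-element greedy, in closed form
theorem repl_step (lN : Nat) (v : Int) (d : PySem.Dict Int Int) (c : Int)
    (hpos : ∀ k, 0 ≤ d.getD k 0) :
    ((List.replicate lN v).foldl pstep (d, c)).2
        = c + min (lN : Int) (d.getD (v - 1) 0)
            + min ((lN : Int) - min (lN : Int) (d.getD (v - 1) 0)) (d.getD (v + 1) 0)
    ∧ ∀ k, ((List.replicate lN v).foldl pstep (d, c)).1.getD k 0
        = d.getD k 0 - (if k = v - 1 then min (lN : Int) (d.getD (v - 1) 0) else 0)
            - (if k = v + 1 then min ((lN : Int) - min (lN : Int) (d.getD (v - 1) 0)) (d.getD (v + 1) 0) else 0) := by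
  induction lN generalizing d c with
  | zero =>
    constructor
    · have := hpos (v - 1); have := hpos (v + 1)
      simp only [List.replicate_zero, List.foldl_nil]
      omega
    · intro k
      have := hpos (v - 1); have := hpos (v + 1)
      simp only [List.replicate_zero, List.foldl_nil]
      by_cases h1 : k = v - 1 <;> by_cases h2 : k = v + 1 <;> simp [h1, h2] <;> omega
  | succ lN ih =>
    have hne : ¬ (v + 1 = v - 1) := by omega
    have hne' : ¬ (v - 1 = v + 1) := by omega
    rw [List.replicate_succ, List.foldl_cons]
    by_cases h1 : d.getD (v - 1) 0 > 0
    · have hst : pstep (d, c) v = (d.insert (v - 1) (d.getD (v - 1) 0 - 1), c + 1) := by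
        simp [pstep, h1]
      rw [hst]
      have hpos' : ∀ k, 0 ≤ (d.insert (v - 1) (d.getD (v - 1) 0 - 1)).getD k 0 := by
        intro k; rw [PySem.Dict.getD_insert]
        by_cases h : k = v - 1
        · rw [if_pos h]; omega
        · rw [if_neg h]; exact hpos k
      obtain ⟨ihc, ihd⟩ := ih (d.insert (v - 1) (d.getD (v - 1) 0 - 1)) (c + 1) hpos'
      have e1 : (d.insert (v - 1) (d.getD (v - 1) 0 - 1)).getD (v - 1) 0 = d.getD (v - 1) 0 - 1 := by
        rw [PySem.Dict.getD_insert, if_pos rfl]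
      have e2 : (d.insert (v - 1) (d.getD (v - 1) 0 - 1)).getD (v + 1) 0 = d.getD (v + 1) 0 := by
        rw [PySem.Dict.getD_insert, if_neg hne]
      constructor
      · rw [ihc, e1, e2]
        push_cast
        omega
      · intro k
        rw [ihd k, e1, e2, PySem.Dict.getD_insert]
        push_cast
        by_cases hk1 : k = v - 1 <;> by_cases hk2 : k = v + 1 <;>
          simp only [hk1, hk2, if_pos rfl, if_neg hne, if_neg hne'] <;> first | omega | (simp [hk1, hk2]; try omega)
    · have hc1 : d.getD (v - 1) 0 = 0 := by have := hpos (v - 1); omega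
      by_cases h2 : d.getD (v + 1) 0 > 0
      · have hst : pstep (d, c) v = (d.insert (v + 1) (d.getD (v + 1) 0 - 1), c + 1) := by
          simp [pstep, h1, h2]
        rw [hst]
        have hpos' : ∀ k, 0 ≤ (d.insert (v + 1) (d.getD (v + 1) 0 - 1)).getD k 0 := by
          intro k; rw [PySem.Dict.getD_insert]
          by_cases h : k = v + 1
          · rw [if_pos h]; omega
          · rw [if_neg h]; exact hpos k
        obtain ⟨ihc, ihd⟩ := ih (d.insert (v + 1) (d.getD (v + 1) 0 - 1)) (c + 1) hpos'
        have e1 : (d.insert (v + 1) (d.getD (v + 1) 0 - 1)).getD (v - 1) 0 = d.getD (v - 1) 0 := by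
          rw [PySem.Dict.getD_insert, if_neg hne']
        have e2 : (d.insert (v + 1) (d.getD (v + 1) 0 - 1)).getD (v + 1) 0 = d.getD (v + 1) 0 - 1 := by
          rw [PySem.Dict.getD_insert, if_pos rfl]
        constructor
        · rw [ihc, e1, e2, hc1]
          push_cast
          omega
        · intro k
          rw [ihd k, e1, e2, PySem.Dict.getD_insert, hc1]
          push_cast
          by_cases hk1 : k = v - 1 <;> by_cases hk2 : k = v + 1 <;>
            simp only [hk1, hk2, if_pos rfl, if_neg hne, if_neg hne'] <;> first | omega | (simp [hk1, hk2]; try omega)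
      · have hc2 : d.getD (v + 1) 0 = 0 := by have := hpos (v + 1); omega
        have hst : pstep (d, c) v = (d, c) := by
          simp [pstep, h1, h2]
        rw [hst]
        obtain ⟨ihc, ihd⟩ := ih d c hpos
        constructor
        · rw [ihc, hc1, hc2]
          push_cast
          omega
        · intro k
          rw [ihd k, hc1, hc2]
          push_cast
          by_cases hk1 : k = v - 1 <;> by_cases hk2 : k = v + 1 <;>
            simp only [hk1, hk2, if_pos rfl, if_neg hne, if_neg hne'] <;> omega

-- the sweep over distinct values simulates the per-element greedy over the buckets
theorem outer (mult : Int → Nat) (lc : PySem.Dict Int Int) (K : List Int)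
    (d rem : PySem.Dict Int Int) (cA m cB : Int)
    (hpt : ∀ k, d.getD k 0 = rem.getD k 0) (hpos : ∀ k, 0 ≤ d.getD k 0) (hcc : cA = cB)
    (hmul : ∀ v ∈ K, lc.getD v 0 = (mult v : Int)) :
    (K.foldl (fun s v => (List.replicate (mult v) v).foldl pstep s) (d, cA)).2
      = (K.foldl (bstep lc) (rem, m, cB)).2.2
    ∧ (K.foldl (bstep lc) (rem, m, cB)).2.1 = m + ((K.map (fun v => (mult v : Int))).sum) := by
  induction K generalizing d rem cA m cB with
  | nil => simpa using hcc
  | cons v K' ih =>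
    simp only [List.foldl_cons, List.map_cons, List.sum_cons]
    obtain ⟨hrc, hrd⟩ := repl_step (mult v) v d cA hpos
    have hl : lc.getD v 0 = (mult v : Int) := hmul v (List.mem_cons_self ..)
    have hl' : ∀ u ∈ K', lc.getD u 0 = (mult u : Int) := fun u hu => hmul u (List.mem_cons_of_mem _ hu)
    have hne : ¬ ((v : Int) + 1 = v - 1) := by omega
    set a := min ((mult v : Int)) (d.getD (v - 1) 0) with ha
    set b := min (((mult v : Int)) - a) (d.getD (v + 1) 0) with hb
    set B := bstep lc (rem, m, cB) v with hBset
    have hrem1 : ∀ k, (if a ≠ 0 then rem.insert (v - 1) (rem.getD (v - 1) 0 - a) else rem).getD k 0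
        = rem.getD k 0 - (if k = v - 1 then a else 0) := by
      intro k
      by_cases hA : a ≠ 0
      · rw [if_pos hA, PySem.Dict.getD_insert]
        by_cases hk : k = v - 1 <;> simp [hk]
      · rw [if_neg hA]
        by_cases hk : k = v - 1 <;> simp [hk] <;> omega
    have hrem1v : (if a ≠ 0 then rem.insert (v - 1) (rem.getD (v - 1) 0 - a) else rem).getD (v + 1) 0
        = rem.getD (v + 1) 0 := by
      rw [hrem1, if_neg hne, sub_zero]
    have haR : min (lc.getD v 0) (rem.getD (v - 1) 0) = a := by
      rw [hl, ← hpt, ha]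
    have hbR : min (lc.getD v 0 - a) (rem.getD (v + 1) 0) = b := by
      rw [hl, ← hpt, hb]
    have hBdef : B = (if b ≠ 0 then (if a ≠ 0 then rem.insert (v - 1) (rem.getD (v - 1) 0 - a) else rem).insert
            (v + 1) (rem.getD (v + 1) 0 - b)
          else (if a ≠ 0 then rem.insert (v - 1) (rem.getD (v - 1) 0 - a) else rem),
          m + (mult v : Int), cB + a + b) := by
      rw [hBset]
      simp only [bstep]
      rw [haR, hrem1v, hbR, hl]
    have hBD : ∀ k, B.1.getD k 0
        = rem.getD k 0 - (if k = v - 1 then a else 0) - (if k = v + 1 then b else 0) := by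
      intro k
      rw [hBdef]
      by_cases hBne : b ≠ 0
      · simp only [if_pos hBne, PySem.Dict.getD_insert]
        by_cases hk : k = v + 1
        · rw [if_pos hk, if_pos hk, hk, if_neg hne]
          omega
        · rw [if_neg hk, if_neg hk, hrem1, sub_zero]
      · simp only [if_neg hBne]
        rw [hrem1]
        have hb0 : b = 0 := by omega
        by_cases hk : k = v + 1 <;> simp [hk, hb0]
    have hB2 : B.2.1 = m + (mult v : Int) := by rw [hBdef]
    have hB3 : B.2.2 = cB + a + b := by rw [hBdef]
    have hpos' : ∀ k, 0 ≤ ((List.replicate (mult v) v).foldl pstep (d, cA)).1.getD k 0 := by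
      intro k
      rw [hrd k]
      have h1 := hpos (v - 1)
      have h2 := hpos (v + 1)
      have h3 := hpos k
      by_cases hk1 : k = v - 1 <;> by_cases hk2 : k = v + 1 <;>
        simp only [hk1, hk2, if_pos rfl, if_neg hne] <;> simp [hk1, hk2] <;> omega
    have hpt' : ∀ k, ((List.replicate (mult v) v).foldl pstep (d, cA)).1.getD k 0 = B.1.getD k 0 := by
      intro k
      rw [hrd k, hBD k, hpt]
    have hcc' : ((List.replicate (mult v) v).foldl pstep (d, cA)).2 = B.2.2 := by
      rw [hrc, hB3, hcc]
    obtain ⟨ih1, ih2⟩ := ih ((List.replicate (mult v) v).foldl pstep (d, cA)).1 B.1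
      ((List.replicate (mult v) v).foldl pstep (d, cA)).2 B.2.1 B.2.2 hpt' hpos' hcc' hl'
    refine ⟨ih1, ?_⟩
    refine ih2.trans ?_
    rw [hB2]
    ring

-- the sorted lost2 list is the concatenation of its value buckets
theorem L2_flatMap (lost reserve : List Int) :
    PySem.List.sorted (lost.filter (fun x => !reserve.contains x)) (fun x => x) false
      = ((PySem.List.sorted (PySem.Set.ofList lost) (fun v => v) false).filter
          (fun v => !reserve.contains v)).flatMap (fun v => List.replicate (lost.count v) v) := by
  have hKlt : (((PySem.List.sorted (PySem.Set.ofList lost) (fun v => v) false).filter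
      (fun v => !reserve.contains v))).Pairwise (· < ·) :=
    List.Pairwise.sublist List.filter_sublist (PySem.List.sorted_ofList_pairwise_lt lost)
  refine List.Perm.eq_of_pairwise (le := (· ≤ ·)) (fun a b _ _ h1 h2 => le_antisymm h1 h2)
    (PySem.List.sorted_pairwise _ _) ?_ ?_
  · -- RHS is sorted
    clear hKlt
    generalize hK : ((PySem.List.sorted (PySem.Set.ofList lost) (fun v => v) false).filter
        (fun v => !reserve.contains v)) = K
    have hKlt : K.Pairwise (· < ·) := by
      rw [← hK]
      exact List.Pairwise.sublist List.filter_sublist (PySem.List.sorted_ofList_pairwise_lt lost)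
    clear hK
    induction K with
    | nil => simp
    | cons v K' ih =>
      rw [List.flatMap_cons, List.pairwise_append]
      refine ⟨?_, ih (List.pairwise_cons.mp hKlt).2, ?_⟩
      · exact (List.pairwise_replicate).mpr (Or.inr le_rfl)
      · intro x hx y hy
        rcases List.mem_flatMap.mp hy with ⟨u, hu, hyu⟩
        rw [List.eq_of_mem_replicate hx, List.eq_of_mem_replicate hyu]
        exact le_of_lt ((List.pairwise_cons.mp hKlt).1 u hu)
  · -- permutation, via counts
    rw [List.perm_iff_count]
    intro k
    have hcountR : ∀ (K : List Int), K.Pairwise (· < ·) →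
        (K.flatMap (fun v => List.replicate (lost.count v) v)).count k
          = if k ∈ K then lost.count k else 0 := by
      intro K hK
      induction K with
      | nil => simp
      | cons v K' ih =>
        rw [List.flatMap_cons, List.count_append, ih (List.pairwise_cons.mp hK).2, List.count_replicate]
        by_cases hkv : v = k
        · subst hkv
          have : v ∉ K' := fun hm => lt_irrefl v ((List.pairwise_cons.mp hK).1 v hm)
          simp [this]
        · simp only [beq_iff_eq, if_neg hkv, List.mem_cons]
          by_cases hm : k ∈ K'
          · simp [hm]
          · have hnv : ¬ (k = v ∨ k ∈ K') := by
              rintro (hh | hh)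
              · exact hkv hh.symm
              · exact hm hh
            simp [hm, hnv]
            intro hh
            exact absurd hh.symm hkv
    rw [hcountR _ hKlt]
    have hcountL : (PySem.List.sorted (lost.filter (fun x => !reserve.contains x)) (fun x => x) false).count k
        = (lost.filter (fun x => !reserve.contains x)).count k :=
      (PySem.List.sorted_perm _ _ _).count_eq k
    rw [hcountL]
    have hmemK : k ∈ ((PySem.List.sorted (PySem.Set.ofList lost) (fun v => v) false).filter
        (fun v => !reserve.contains v)) ↔ (k ∈ lost ∧ reserve.contains k = false) := by
      rw [List.mem_filter, PySem.List.mem_sorted, PySem.Set.mem_ofList]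
      simp
    by_cases hres : reserve.contains k
    · have hnm : ¬ (k ∈ ((PySem.List.sorted (PySem.Set.ofList lost) (fun v => v) false).filter
          (fun v => !reserve.contains v))) := fun hm => by
        have := (hmemK.mp hm).2
        rw [this] at hres
        exact Bool.noConfusion hres
      rw [if_neg hnm]
      refine List.count_eq_zero.mpr (fun hm => ?_)
      have h2 := (List.mem_filter.mp hm).2
      rw [hres] at h2
      simp at h2
    · by_cases hkl : k ∈ lost
      · rw [if_pos (hmemK.mpr ⟨hkl, by simpa using hres⟩)]
        exact List.count_filter (by simpa using hres)
      · have h0 : (lost.filter (fun x => !reserve.contains x)).count k = 0 :=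
          List.count_eq_zero.mpr (fun hm => hkl (List.mem_filter.mp hm).1)
        have h1 : lost.count k = 0 := List.count_eq_zero.mpr hkl
        rw [h0]
        split_ifs <;> omega

theorem cast_sum_map (K : List Int) (f : Int → Nat) :
    (((K.map f).sum : Nat) : Int) = (K.map (fun v => (f v : Int))).sum := by
  induction K with
  | nil => simp
  | cons v K' ih => simp [ih]

theorem solution_eq_alt (n : Int) (lost reserve : List Int) :
    solution n lost reserve = solution_alt n lost reserve := by
  simp only [solution, solution_alt, PySem.Dict.foldl_insert_getD_add_one_eq_counter,
    PySem.Dict.keys_counter]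
  rw [lost2_eq, altStep_filter]
  simp only [PySem.Dict.contains_counter]
  rw [L2_flatMap]
  have hc : ∀ k, (((PySem.List.sorted lost (fun x => x) false).foldl (fun r x => popEq r x)
        (PySem.List.sorted reserve (fun x => x) false)).count k : Int)
      = ((PySem.Dict.counter reserve).items.foldl
          (fun d p => d.insert p.1 (p.2 - min p.2 ((PySem.Dict.counter lost).getD p.1 0)))
          (PySem.Dict.empty : PySem.Dict Int Int)).getD k 0 :=
    fun k => (counts_eq lost reserve k).trans (rem_getD lost reserve k).symm
  rw [loop3_eq _ _ _ 0 0
    (pairwise_foldl_popEq _ _ (PySem.List.sorted_pairwise reserve (fun x => x))) hc rfl]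
  rw [List.foldl_flatMap]
  obtain ⟨o1, o2⟩ := outer (fun v => lost.count v) (PySem.Dict.counter lost)
    ((PySem.List.sorted (PySem.Set.ofList lost) (fun v => v) false).filter (fun v => !reserve.contains v))
    ((PySem.Dict.counter reserve).items.foldl
        (fun d p => d.insert p.1 (p.2 - min p.2 ((PySem.Dict.counter lost).getD p.1 0)))
        (PySem.Dict.empty : PySem.Dict Int Int))
    ((PySem.Dict.counter reserve).items.foldl
        (fun d p => d.insert p.1 (p.2 - min p.2 ((PySem.Dict.counter lost).getD p.1 0)))
        (PySem.Dict.empty : PySem.Dict Int Int))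
    0 0 0 (fun k => rfl)
    (fun k => by rw [rem_getD]; exact le_max_left 0 _) rfl
    (fun v _ => PySem.Dict.getD_counter lost v)
  rw [o1, o2]
  have hlen : (((((PySem.List.sorted (PySem.Set.ofList lost) (fun v => v) false).filter
        (fun v => !reserve.contains v)).flatMap (fun v => List.replicate (lost.count v) v)).length : Int))
      = (((PySem.List.sorted (PySem.Set.ofList lost) (fun v => v) false).filter
        (fun v => !reserve.contains v)).map (fun v => ((lost.count v : Nat) : Int))).sum := by
    rw [List.length_flatMap]
    simp only [List.length_replicate]
    exact cast_sum_map _ _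
  rw [hlen]
  ring

-- ===== VERDICT (by name: the statement is the Claim_ definition above) =====
theorem solution_spec : Claim_equal_solution := by
  intro n lost reserve _
  exact solution_eq_alt n lost reserve
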